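-- pv_equiv track=rewrite | github.com/UncleAnthonys/colouring-app-backend | adventure_config.py | get_story_for_age
-- ===== SOURCE A (Python) =====
-- def get_story_for_age(episode_stories: dict, age_level: str) -> str:
--     """Get the appropriate story text for the given age level."""
--     # Try exact match first
--     if age_level in episode_stories:
--         return episode_stories[age_level]
--
--     # Fall back to closest age
--     age_order = ["under_3", "age_3", "age_4", "age_5", "age_6", "age_7", "age_8", "age_9", "age_10"]
--
--     try:
--         target_idx = age_order.index(age_level)
--     except ValueError:
--         return episode_stories.get("age_6", list(episode_stories.values())[0])
--
--     # Try lower ages first, then higher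
--     for offset in range(len(age_order)):
--         for direction in [-1, 1]:
--             check_idx = target_idx + (offset * direction)
--             if 0 <= check_idx < len(age_order):
--                 check_age = age_order[check_idx]
--                 if check_age in episode_stories:
--                     return episode_stories[check_age]
--
--     # Last resort
--     return list(episode_stories.values())[0]
-- ===== SOURCE B (Python) =====
-- def get_story_for_age(episode_stories: dict, age_level: str) -> str:
--     """Get the appropriate story text for the given age level."""
--     if age_level in episode_stories:
--         return episode_stories[age_level]
--
--     age_order = ["under_3", "age_3", "age_4", "age_5", "age_6", "age_7", "age_8", "age_9", "age_10"]
--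
--     if age_level not in age_order:
--         return episode_stories.get("age_6", list(episode_stories.values())[0])
--
--     t = age_order.index(age_level)
--     # Single selection pass: among the ages actually present, keep the one whose
--     # (distance to target, is-higher-than-target) key is smallest.
--     best = None  # (key, age)
--     for i, age in enumerate(age_order):
--         if age in episode_stories:
--             key = (abs(i - t), i > t)
--             if best is None or key < best[0]:
--                 best = (key, age)
--     if best is not None:
--         return episode_stories[best[1]]
--     return list(episode_stories.values())[0]
-- ===== Notes on version B (the rewrite author's own statement) =====
-- stated objective: alternative
-- what changed: A searches candidate indices outward from the target (nested offset/direction loops) and returns on the first hit; B makes one selection pass over the fixed age table, keeping an argmin accumulator (distance-to-target, is-higher) over the ages actually present, then returns the kept age's story; exact-match, unknown-age fallback and first-value last resort unchanged.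
-- outside the precondition, e.g. on get_story_for_age({}, 'age_5'): A raises IndexError, B raises IndexError
import Mathlib
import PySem

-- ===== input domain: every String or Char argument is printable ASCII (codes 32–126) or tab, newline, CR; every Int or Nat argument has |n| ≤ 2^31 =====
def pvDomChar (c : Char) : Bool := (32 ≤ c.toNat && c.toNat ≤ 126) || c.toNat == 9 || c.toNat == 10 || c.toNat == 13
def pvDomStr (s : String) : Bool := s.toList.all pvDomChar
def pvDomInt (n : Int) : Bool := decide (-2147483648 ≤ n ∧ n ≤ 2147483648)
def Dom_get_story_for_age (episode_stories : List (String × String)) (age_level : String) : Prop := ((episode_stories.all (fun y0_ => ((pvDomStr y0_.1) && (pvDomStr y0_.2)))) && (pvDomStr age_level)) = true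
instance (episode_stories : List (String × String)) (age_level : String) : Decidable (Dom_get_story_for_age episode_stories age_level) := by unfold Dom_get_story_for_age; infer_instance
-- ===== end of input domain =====

-- B replaces A's outward offset/direction search by one argmin selection pass over the
-- age table (accumulator keeps the present age with the smallest (distance, is-higher) key);
-- same return value, a different decomposition (search vs. select).

-- ===== PORT A =====
-- early-return loop: fold that keeps the first `some` (Python's `return` inside a for loop)
def pyEarlyFold {β : Type} (L : List Int) (g : Int → Option β) (a : Option β) : Option β :=
  L.foldl (fun acc x => match acc with | some _ => acc | none => g x) a

def pvAgeOrder : List String := ["under_3", "age_3", "age_4", "age_5", "age_6", "age_7", "age_8", "age_9", "age_10"]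

def get_story_for_age (episode_stories : List (String × String)) (age_level : String) : String :=
  let d := PySem.Dict.ofList episode_stories
  match PySem.Dict.get? d age_level with
  | some v => v
  | none =>
    match PySem.List.index? pvAgeOrder age_level with
    | none => PySem.Dict.getD d "age_6" ((PySem.List.pyGet? (PySem.Dict.values d) 0).getD "")
    | some target_idx =>
      let res := pyEarlyFold (PySem.List.pyRange 0 9 1) (fun offset =>
        pyEarlyFold [(-1 : Int), 1] (fun direction =>
          let check_idx := (target_idx : Int) + offset * direction
          if 0 ≤ check_idx ∧ check_idx < 9 then
            match PySem.List.pyGet? pvAgeOrder check_idx with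
            | some check_age => PySem.Dict.get? d check_age
            | none => none
          else none) none) none
      match res with
      | some v => v
      | none => (PySem.List.pyGet? (PySem.Dict.values d) 0).getD ""

-- ===== PORT B =====
-- Python tuple comparison (int, bool) <: strict lexicographic, False < True
def pvKeyLt (a b : Int × Bool) : Bool := a.1 < b.1 || (a.1 == b.1 && !a.2 && b.2)

def get_story_for_age_alt (episode_stories : List (String × String)) (age_level : String) : String :=
  let d := PySem.Dict.ofList episode_stories
  match PySem.Dict.get? d age_level with
  | some v => v
  | none =>
    match PySem.List.index? pvAgeOrder age_level with
    | none => PySem.Dict.getD d "age_6" ((PySem.List.pyGet? (PySem.Dict.values d) 0).getD "")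
    | some t =>
      let best := (PySem.List.enumerate pvAgeOrder).foldl
        (fun (acc : Option ((Int × Bool) × String)) p =>
          if (PySem.Dict.get? d p.2).isSome then
            let key := (|p.1 - (t : Int)|, decide ((t : Int) < p.1))
            match acc with
            | none => some (key, p.2)
            | some b => if pvKeyLt key b.1 then some (key, p.2) else acc
          else acc) none
      match best with
      | some b => (PySem.Dict.get? d b.2).getD ""
      | none => (PySem.List.pyGet? (PySem.Dict.values d) 0).getD ""

-- ===== PRECONDITION & SPEC =====
-- Pre_ excludes the empty dict, on which Python A raises IndexError (list(episode_stories.values())[0]); B raises there too.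
def Pre_get_story_for_age (episode_stories : List (String × String)) (age_level : String) : Prop :=
  episode_stories ≠ []
instance (episode_stories : List (String × String)) (age_level : String) : Decidable (Pre_get_story_for_age episode_stories age_level) := by unfold Pre_get_story_for_age; infer_instance

def pvWitness_get_story_for_age : (List (String × String)) × String := ([("age_4", "story4"), ("age_8", "story8")], "age_6")

def Spec_get_story_for_age (episode_stories : List (String × String)) (age_level : String) (out : String) : Prop := out = get_story_for_age_alt episode_stories age_level
instance (episode_stories : List (String × String)) (age_level : String) (out : String) : Decidable (Spec_get_story_for_age episode_stories age_level out) := by unfold Spec_get_story_for_age; infer_instance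

-- ===== CLAIM (what is proved, stated in full; the proofs are below) =====
def Claim_equal_get_story_for_age : Prop := ∀ (episode_stories : List (String × String)) (age_level : String), Dom_get_story_for_age episode_stories age_level → Pre_get_story_for_age episode_stories age_level → Spec_get_story_for_age episode_stories age_level (get_story_for_age episode_stories age_level)

-- ===== LEMMAS AND PROOFS =====
theorem pyEarlyFold_eq_findSome? {β : Type} (L : List Int) (g : Int → Option β) (a : Option β) :
    pyEarlyFold L g a = (match a with | some v => some v | none => L.findSome? g) := by
  induction L generalizing a with
  | nil => cases a <;> simp [pyEarlyFold]
  | cons x l ih =>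
    cases a with
    | some v => rw [pyEarlyFold, List.foldl_cons, ← pyEarlyFold, ih]
    | none =>
      rw [pyEarlyFold, List.foldl_cons, ← pyEarlyFold, ih, List.findSome?_cons]
      cases g x <;> simp


theorem findSome?_flatMap' {α β γ : Type} (L : List α) (g : α → List β) (f : β → Option γ) :
    (L.flatMap g).findSome? f = L.findSome? (fun a => (g a).findSome? f) := by
  induction L with
  | nil => rfl
  | cons x l ih =>
    rw [List.flatMap_cons, List.findSome?_append, List.findSome?_cons]
    cases h : (g x).findSome? f <;> simp [h, ih]

theorem findSome?_if_filter {α γ : Type} (L : List α) (P : α → Prop) [DecidablePred P]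
    (f : α → Option γ) :
    L.findSome? (fun a => if P a then f a else none)
      = (L.filter (fun a => decide (P a))).findSome? f := by
  induction L with
  | nil => rfl
  | cons x l ih =>
    by_cases hx : P x
    · simp [List.findSome?_cons, hx, ih]
    · simp [List.findSome?_cons, hx, ih]

theorem findSome?_eq_bind_find? {α γ : Type} (L : List α) (f : α → Option γ) :
    L.findSome? f = (L.find? (fun a => (f a).isSome)).bind f := by
  induction L with
  | nil => rfl
  | cons x l ih =>
    cases hf : f x <;> simp [List.findSome?_cons, List.find?_cons, hf, ih]

theorem find?_congr' {α : Type} (L : List α) (p p' : α → Bool)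
    (h : ∀ a ∈ L, p a = p' a) : L.find? p = L.find? p' := by
  induction L with
  | nil => rfl
  | cons x l ih =>
    rw [List.find?_cons, List.find?_cons, h x (List.mem_cons_self ..)]
    cases p' x <;> simp [ih fun a ha => h a (List.mem_cons_of_mem _ ha)]

def pvFlatL (t : Int) : List Int :=
  ((PySem.List.pyRange 0 9 1).flatMap (fun off => [t + off * (-1), t + off * 1])).filter
    (fun c => decide (0 ≤ c ∧ c < 9))

def pvKeyOf (t i : Int) : Int × Bool := (|i - t|, decide (t < i))

def pvSelStep (t : Int) (bits : Int → Bool) (acc : Option Int) (i : Int) : Option Int :=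
  if bits i then
    match acc with
    | none => some i
    | some j => if pvKeyLt (pvKeyOf t i) (pvKeyOf t j) then some i else acc
  else acc

def pvSelB (t : Int) (bits : Int → Bool) : Option Int :=
  ([0, 1, 2, 3, 4, 5, 6, 7, 8] : List Int).foldl (pvSelStep t bits) none

-- the 9 presence bits as a lookup table agrees with the original on 0..8
theorem bits_table (bits : Int → Bool) (c : Int) (h0 : 0 ≤ c) (h1 : c < 9) :
    [bits 0, bits 1, bits 2, bits 3, bits 4, bits 5, bits 6, bits 7,
      bits 8].getD c.toNat false = bits c := by
  interval_cases c <;> rfl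

theorem mem_flatL {t c : Int} (h : c ∈ pvFlatL t) : 0 ≤ c ∧ c < 9 := by
  unfold pvFlatL at h
  have := (List.mem_filter.mp h).2
  simpa using this

theorem mem_idxs {c : Int} (h : c ∈ ([0, 1, 2, 3, 4, 5, 6, 7, 8] : List Int)) :
    0 ≤ c ∧ c < 9 := by
  simp only [List.mem_cons, List.not_mem_nil, or_false] at h
  rcases h with rfl | rfl | rfl | rfl | rfl | rfl | rfl | rfl | rfl <;> norm_num

-- kernel-checked skeleton: A's priority search and B's argmin select the same index
-- for every target and every pattern of present ages
theorem skeleton : ∀ (tf : Fin 9) (b0 b1 b2 b3 b4 b5 b6 b7 b8 : Bool),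
    (pvFlatL ((tf : Nat) : Int)).find?
        (fun c => [b0, b1, b2, b3, b4, b5, b6, b7, b8].getD c.toNat false)
      = pvSelB ((tf : Nat) : Int)
          (fun c => [b0, b1, b2, b3, b4, b5, b6, b7, b8].getD c.toNat false) := by
  decide

-- simulation: B's fold over (index, age) pairs tracks the index-level argmin fold
theorem simB (q : String → Option String) (t : Int) :
    ∀ (L : List (Int × String)) (acc : Option Int),
      (∀ p ∈ L, PySem.List.pyGet? pvAgeOrder p.1 = some p.2) →
      L.foldl
          (fun acc p =>
            if (q p.2).isSome = true then
              match acc with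
              | none => some ((|p.1 - t|, decide (t < p.1)), p.2)
              | some b =>
                if pvKeyLt (|p.1 - t|, decide (t < p.1)) b.1 = true then
                  some ((|p.1 - t|, decide (t < p.1)), p.2)
                else acc
            else acc)
          (acc.map (fun i => (pvKeyOf t i, (PySem.List.pyGet? pvAgeOrder i).getD "")))
        = (L.foldl
              (fun a p =>
                pvSelStep t (fun i => ((PySem.List.pyGet? pvAgeOrder i).bind q).isSome) a p.1)
              acc).map
            (fun i => (pvKeyOf t i, (PySem.List.pyGet? pvAgeOrder i).getD "")) := by
  intro L
  induction L with
  | nil => intro acc _; rfl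
  | cons p l ih =>
    intro acc hL
    have hp : PySem.List.pyGet? pvAgeOrder p.1 = some p.2 :=
      hL p (List.mem_cons_self ..)
    rw [List.foldl_cons, List.foldl_cons]
    have hstep :
        (if (q p.2).isSome = true then
            match acc.map (fun i => (pvKeyOf t i, (PySem.List.pyGet? pvAgeOrder i).getD "")) with
            | none => some ((|p.1 - t|, decide (t < p.1)), p.2)
            | some b =>
              if pvKeyLt (|p.1 - t|, decide (t < p.1)) b.1 = true then
                some ((|p.1 - t|, decide (t < p.1)), p.2)
              else acc.map (fun i => (pvKeyOf t i, (PySem.List.pyGet? pvAgeOrder i).getD ""))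
          else acc.map (fun i => (pvKeyOf t i, (PySem.List.pyGet? pvAgeOrder i).getD "")))
        = (pvSelStep t (fun i => ((PySem.List.pyGet? pvAgeOrder i).bind q).isSome) acc p.1).map
            (fun i => (pvKeyOf t i, (PySem.List.pyGet? pvAgeOrder i).getD "")) := by
      unfold pvSelStep
      cases hq : (q p.2).isSome <;> cases acc <;>
        simp [pvKeyOf, hp, hq] <;> split_ifs <;> simp [pvKeyOf, hp]
    rw [hstep, ih _ fun a ha => hL a (List.mem_cons_of_mem _ ha)]

theorem master (q : String → Option String) (z : String) (t : Nat) (ht : t < 9) :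
    (match
        pyEarlyFold (PySem.List.pyRange 0 9 1)
          (fun offset =>
            pyEarlyFold [(-1 : Int), 1]
              (fun direction =>
                if 0 ≤ (t : Int) + offset * direction ∧ (t : Int) + offset * direction < 9 then
                  match PySem.List.pyGet? pvAgeOrder ((t : Int) + offset * direction) with
                  | some check_age => q check_age
                  | none => none
                else none)
              none)
          none with
      | some v => v
      | none => z)
    =
    (match
        List.foldl
          (fun acc p =>
            if (q p.2).isSome = true then
              match acc with
              | none => some ((|p.1 - (t : Int)|, decide ((t : Int) < p.1)), p.2)
              | some b =>
                if pvKeyLt (|p.1 - (t : Int)|, decide ((t : Int) < p.1)) b.1 = true then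
                  some ((|p.1 - (t : Int)|, decide ((t : Int) < p.1)), p.2)
                else acc
            else acc)
          none (PySem.List.enumerate pvAgeOrder) with
      | some b => (q b.2).getD ""
      | none => z) := by
  
  have hA :
      pyEarlyFold (PySem.List.pyRange 0 9 1)
          (fun offset =>
            pyEarlyFold [(-1 : Int), 1]
              (fun direction =>
                if 0 ≤ (t : Int) + offset * direction ∧ (t : Int) + offset * direction < 9 then
                  match PySem.List.pyGet? pvAgeOrder ((t : Int) + offset * direction) with
                  | some check_age => q check_age
                  | none => none
                else none)
              none)
          none
        = ((pvFlatL (t : Int)).find?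
              (fun i => ((PySem.List.pyGet? pvAgeOrder i).bind q).isSome)).bind
            (fun c => (PySem.List.pyGet? pvAgeOrder c).bind q) := by
    simp only [pyEarlyFold_eq_findSome?]
    have h1 : (fun (offset : Int) =>
        ([(-1 : Int), 1]).findSome? (fun direction =>
          if 0 ≤ (t : Int) + offset * direction ∧ (t : Int) + offset * direction < 9 then
            match PySem.List.pyGet? pvAgeOrder ((t : Int) + offset * direction) with
            | some check_age => q check_age
            | none => none
          else none))
        = fun (offset : Int) =>
            ([(t : Int) + offset * (-1), (t : Int) + offset * 1]).findSome?
              (fun c => if 0 ≤ c ∧ c < 9 then (PySem.List.pyGet? pvAgeOrder c).bind q else none) := by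
      funext offset
      have hpt : ∀ c : Int,
          (if 0 ≤ c ∧ c < 9 then
              match PySem.List.pyGet? pvAgeOrder c with
              | some check_age => q check_age
              | none => none
            else none)
            = (if 0 ≤ c ∧ c < 9 then (PySem.List.pyGet? pvAgeOrder c).bind q else none) := by
        intro c
        by_cases h : 0 ≤ c ∧ c < 9
        · simp only [if_pos h]
          cases PySem.List.pyGet? pvAgeOrder c <;> rfl
        · simp only [if_neg h]
      simp only [List.findSome?_cons, List.findSome?_nil]
      rw [hpt ((t : Int) + offset * (-1)), hpt ((t : Int) + offset * 1)]
    rw [h1, ← findSome?_flatMap', findSome?_if_filter, findSome?_eq_bind_find?]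
    rfl
  have hmem : ∀ p ∈ PySem.List.enumerate pvAgeOrder,
      PySem.List.pyGet? pvAgeOrder p.1 = some p.2 := by decide
  have hB := simB q (t : Int) (PySem.List.enumerate pvAgeOrder) none hmem
  have hmap : (PySem.List.enumerate pvAgeOrder).map (fun p => p.1)
      = ([0, 1, 2, 3, 4, 5, 6, 7, 8] : List Int) := by decide
  have hsel : (PySem.List.enumerate pvAgeOrder).foldl
        (fun a p => pvSelStep (t : Int)
          (fun i => ((PySem.List.pyGet? pvAgeOrder i).bind q).isSome) a p.1) none
      = pvSelB (t : Int) (fun i => ((PySem.List.pyGet? pvAgeOrder i).bind q).isSome) := by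
    rw [pvSelB, ← hmap, List.foldl_map]
  set bits : Int → Bool := fun i => ((PySem.List.pyGet? pvAgeOrder i).bind q).isSome with hbitsdef
  have hsk := skeleton ⟨t, ht⟩ (bits 0) (bits 1) (bits 2) (bits 3) (bits 4) (bits 5)
    (bits 6) (bits 7) (bits 8)
  have htb1 : (pvFlatL (t : Int)).find?
        (fun c => [bits 0, bits 1, bits 2, bits 3, bits 4, bits 5, bits 6, bits 7,
          bits 8].getD c.toNat false)
      = (pvFlatL (t : Int)).find? bits :=
    find?_congr' _ _ _ (fun a ha => bits_table bits a (mem_flatL ha).1 (mem_flatL ha).2)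
  have htb2 : pvSelB (t : Int)
        (fun c => [bits 0, bits 1, bits 2, bits 3, bits 4, bits 5, bits 6, bits 7,
          bits 8].getD c.toNat false)
      = pvSelB (t : Int) bits := by
    unfold pvSelB
    refine PySem.List.foldl_congr_mem _ _ _ _ ?_
    intro acc x hx
    simp only [pvSelStep]
    simp only [bits_table bits x (mem_idxs hx).1 (mem_idxs hx).2]
  have hB2 : List.foldl
        (fun acc p =>
          if (q p.2).isSome = true then
            match acc with
            | none => some ((|p.1 - (t : Int)|, decide ((t : Int) < p.1)), p.2)
            | some b =>
              if pvKeyLt (|p.1 - (t : Int)|, decide ((t : Int) < p.1)) b.1 = true then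
                some ((|p.1 - (t : Int)|, decide ((t : Int) < p.1)), p.2)
              else acc
          else acc)
        none (PySem.List.enumerate pvAgeOrder)
      = ((pvFlatL (t : Int)).find? bits).map
          (fun i => (pvKeyOf (t : Int) i, (PySem.List.pyGet? pvAgeOrder i).getD "")) := by
    have : (none : Option ((Int × Bool) × String))
        = Option.map (fun i => (pvKeyOf (t : Int) i, (PySem.List.pyGet? pvAgeOrder i).getD ""))
            (none : Option Int) := rfl
    rw [this, hB, hsel, ← htb2, ← hsk, htb1]
  rw [hA, hB2]
  cases hfind : (pvFlatL (t : Int)).find? bits with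
  | none => rfl
  | some i =>
    have hbi : bits i = true := List.find?_some hfind
    rw [hbitsdef] at hbi
    cases hx : PySem.List.pyGet? pvAgeOrder i with
    | none => simp [hx] at hbi
    | some s =>
      cases hq : q s with
      | none => simp [hx, hq] at hbi
      | some v => simp [pvKeyOf, hx, hq]

theorem ports_agree : ∀ es al, get_story_for_age es al = get_story_for_age_alt es al := by
  intro es al
  cases h1 : PySem.Dict.get? (PySem.Dict.ofList es) al with
  | some v =>
    unfold get_story_for_age get_story_for_age_alt
    simp only [h1]
  | none =>
    cases h2 : PySem.List.index? pvAgeOrder al with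
    | none => unfold get_story_for_age get_story_for_age_alt; simp only [h1, h2]
    | some t =>
      have ht : t < 9 := by
        have := PySem.List.getElem_of_index?_eq_some h2
        simpa [pvAgeOrder] using this.1
      unfold get_story_for_age get_story_for_age_alt
      simp only [h1, h2]
      exact master (fun s => PySem.Dict.get? (PySem.Dict.ofList es) s)
        ((PySem.List.pyGet? (PySem.Dict.values (PySem.Dict.ofList es)) 0).getD "") t ht

-- ===== VERDICT (by name: the statement is the Claim_ definition above) =====
theorem get_story_for_age_spec : Claim_equal_get_story_for_age := by
  intro es al _ _
  unfold Spec_get_story_for_age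
  exact ports_agree es al
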